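-- pv_equiv track=rewrite | github.com/elice-bsg/baekseolgi_algorithm_team_note | 2212/23/김도엽_boj_17413_단어뒤집기2.py | solution
-- ===== SOURCE A (Python) =====
-- def flush_sentence(sentence):
--     result = ""
--     word_list = sentence.split()
--
--     for i, word in enumerate(word_list):
--         result += word[len(word) - 1::-1]
--         if i != len(word_list) - 1:
--             result += ' '
--
--     return result
--
-- def solution(sentence):
--     answer = ""
--     is_tag = False
--     word_stack = ""
--
--     for token in sentence:
--         if not is_tag and token != '<':
--             word_stack += token
--         elif not is_tag and token == '<':
--             tmp = flush_sentence(word_stack)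
--             answer += (tmp + token)
--             is_tag = True
--             word_stack = ""
--         elif is_tag and token != '>':
--             answer += token
--         elif is_tag and token == '>':
--             is_tag = False
--             answer += token
--
--     answer += flush_sentence(word_stack)
--
--     return answer
-- ===== SOURCE B (Python) =====
-- def solution(sentence):
--     # Segment the input with str.partition instead of a char-by-char state machine:
--     # consume a whole tag or a whole text run per iteration.
--     out = []
--     rest = sentence
--     while rest:
--         if rest[0] == '<':
--             body, close, rest = rest[1:].partition('>')
--             out.append('<' + body + close)
--         else:
--             text, lt, after = rest.partition('<')
--             out.append(' '.join(w[::-1] for w in text.split()))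
--             rest = lt + after
--     return ''.join(out)
-- ===== Notes on version B (the rewrite author's own statement) =====
-- stated objective: idiomatic
-- what changed: A runs a character-level state machine with a tag flag and a word stack flushed at each tag opener, growing the answer by string concatenation; B tokenizes the string segment-wise with str.partition, copying each whole tag verbatim and word-reversing each whole text run with split/join, then joins the pieces once.
import Mathlib
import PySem

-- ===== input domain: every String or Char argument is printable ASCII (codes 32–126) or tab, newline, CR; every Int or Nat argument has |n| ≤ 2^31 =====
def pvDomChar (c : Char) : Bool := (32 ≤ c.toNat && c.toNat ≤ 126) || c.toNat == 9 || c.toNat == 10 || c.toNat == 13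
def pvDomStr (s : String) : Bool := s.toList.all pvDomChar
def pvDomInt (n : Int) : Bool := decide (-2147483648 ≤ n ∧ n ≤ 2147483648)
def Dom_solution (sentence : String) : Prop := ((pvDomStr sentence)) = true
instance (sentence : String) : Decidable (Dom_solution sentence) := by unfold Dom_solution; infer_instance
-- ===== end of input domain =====

-- B replaces A's char-by-char three-field state machine by a segment-wise tokenizer
-- (str.partition consumes a whole tag or a whole text run per loop step); objective: idiomatic.

-- ===== PORT A =====
-- flush_sentence: split, reverse each word (word[len(word)-1::-1]), single spaces between
def pvFlush (ws : List Char) : List Char :=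
  let wl := PySem.Chars.split₀ ws
  (PySem.List.enumerate wl).foldl
    (fun res iw =>
      let res := res ++ (PySem.List.slice? iw.2 (some ((iw.2.length : Int) - 1)) none (-1)).getD []
      if iw.1 ≠ (wl.length : Int) - 1 then res ++ [' '] else res)
    []

-- one iteration of A's for-loop; state = (answer, is_tag, word_stack)
def pvStepA (st : List Char × Bool × List Char) (c : Char) : List Char × Bool × List Char :=
  if st.2.1 = false ∧ c ≠ '<' then (st.1, st.2.1, st.2.2 ++ [c])
  else if st.2.1 = false ∧ c = '<' then (st.1 ++ pvFlush st.2.2 ++ [c], true, [])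
  else if st.2.1 = true ∧ c ≠ '>' then (st.1 ++ [c], st.2.1, st.2.2)
  else (st.1 ++ [c], false, st.2.2)

def solution (sentence : String) : String :=
  let st := sentence.toList.foldl pvStepA ([], false, [])
  String.ofList (st.1 ++ pvFlush st.2.2)

-- ===== PORT B =====
-- ' '.join(w[::-1] for w in text.split())
def pvRevWords (text : List Char) : List Char :=
  PySem.Chars.join [' ']
    ((PySem.Chars.split₀ text).map (fun w => (PySem.List.slice? w none none (-1)).getD []))

-- Source B's while loop; str.partition(ch) for a single-char separator is exactly
-- (takeWhile (· ≠ ch), and the dropWhile remainder carrying the separator) — hand-ported here.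
def pvAltGo : List Char → List Char
  | [] => []
  | c :: rest =>
    if c = '<' then
      let body := rest.takeWhile (fun d => d ≠ '>')
      match h : rest.dropWhile (fun d => d ≠ '>') with
      | [] => '<' :: body
      | d :: r => ('<' :: (body ++ [d])) ++ pvAltGo r
    else
      let text := (c :: rest).takeWhile (fun d => d ≠ '<')
      let after := (c :: rest).dropWhile (fun d => d ≠ '<')
      pvRevWords text ++ pvAltGo after
termination_by l => l.length
decreasing_by
  · have h1 : (d :: r).length ≤ rest.length := h ▸ List.length_dropWhile_le _ rest
    simp at h1; simp; omega
  · have h1 : ((c :: rest).dropWhile (fun d => !decide (d = '<'))).length ≤ rest.length := by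
      rw [List.dropWhile_cons_of_pos (by simpa using ‹¬ c = '<'›)]
      exact List.length_dropWhile_le _ rest
    simp only [ne_eq, decide_not] at h1 ⊢
    simp; omega

def solution_alt (sentence : String) : String :=
  String.ofList (pvAltGo sentence.toList)

-- ===== PRECONDITION & SPEC =====
def Spec_solution (sentence : String) (out : String) : Prop := out = solution_alt sentence
instance (sentence : String) (out : String) : Decidable (Spec_solution sentence out) := by unfold Spec_solution; infer_instance

-- ===== CLAIM (what is proved, stated in full; the proofs are below) =====
def Claim_equal_solution : Prop := ∀ (sentence : String), Dom_solution sentence → Spec_solution sentence (solution sentence)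

-- ===== LEMMAS AND PROOFS =====

theorem pv_flush_nil : pvFlush [] = [] := rfl

-- word[len(word)-1::-1] is the full reverse (Python's default start for step -1 coincides)
theorem pv_slice_pred (w : List Char) :
    PySem.List.slice? w (some ((w.length : Int) - 1)) none (-1) = some w.reverse := by
  rw [← PySem.List.slice?_none_none_neg_one]
  unfold PySem.List.slice? PySem.List.sliceIndices
  cases w with
  | nil => simp
  | cons x t =>
    have h1 : ¬ ((x :: t).length : Int) - 1 < 0 := by simp
    simp only [h1]
    norm_num

theorem pv_enum_cons {α : Type} (x : α) (t : List α) (k : Int) :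
    PySem.List.enumerate (x :: t) k = (k, x) :: PySem.List.enumerate t (k + 1) := rfl

theorem pv_enum_fold (n : Int) :
    ∀ (wl : List (List Char)) (k : Int) (acc : List Char), wl ≠ [] → k + wl.length = n →
    (PySem.List.enumerate wl k).foldl
      (fun res iw => if iw.1 ≠ n - 1 then res ++ iw.2.reverse ++ [' '] else res ++ iw.2.reverse) acc
      = acc ++ PySem.Chars.join [' '] (wl.map List.reverse) := by
  intro wl
  induction wl with
  | nil => simp
  | cons w t ih =>
    intro k acc _ hn
    cases t with
    | nil =>
      have hk : ¬ k ≠ n - 1 := by simp at hn ⊢; omega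
      simp only [pv_enum_cons, List.foldl_cons, if_neg hk]
      simp [PySem.List.enumerate, PySem.Chars.join_singleton]
    | cons u t' =>
      have hk : k ≠ n - 1 := by simp at hn ⊢; omega
      have h2 : (k + 1) + ((u :: t').length : Int) = n := by simp at hn ⊢; omega
      rw [pv_enum_cons, List.foldl_cons, if_pos hk]
      rw [ih (k+1) (acc ++ w.reverse ++ [' ']) (by simp) h2]
      simp [PySem.Chars.join_cons_cons]

theorem pv_flush_eq (ws : List Char) : pvFlush ws = pvRevWords ws := by
  unfold pvFlush pvRevWords
  simp only [pv_slice_pred, PySem.List.slice?_none_none_neg_one, Option.getD_some]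
  cases hw : PySem.Chars.split₀ ws with
  | nil => simp [PySem.List.enumerate, PySem.Chars.join_nil]
  | cons w t =>
    have := pv_enum_fold ((w :: t).length : Int) (w :: t) 0 [] (by simp) (by simp)
    simpa using this

def pvFinal (st : List Char × Bool × List Char) : List Char := st.1 ++ pvFlush st.2.2

theorem pv_text_run (cs : List Char) (h : ∀ c ∈ cs, c ≠ '<') :
    ∀ (a ws : List Char), cs.foldl pvStepA (a, false, ws) = (a, false, ws ++ cs) := by
  induction cs with
  | nil => simp
  | cons c t ih =>
    intro a ws
    have hc : c ≠ '<' := h c (by simp)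
    simp only [List.foldl_cons]
    rw [show pvStepA (a, false, ws) c = (a, false, ws ++ [c]) from by simp [pvStepA, hc]]
    rw [ih (fun x hx => h x (by simp [hx]))]
    simp

theorem pv_tag_run (cs : List Char) (h : ∀ c ∈ cs, c ≠ '>') :
    ∀ (a ws : List Char), cs.foldl pvStepA (a, true, ws) = (a ++ cs, true, ws) := by
  induction cs with
  | nil => simp
  | cons c t ih =>
    intro a ws
    have hc : c ≠ '>' := h c (by simp)
    simp only [List.foldl_cons]
    rw [show pvStepA (a, true, ws) c = (a ++ [c], true, ws) from by simp [pvStepA, hc]]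
    rw [ih (fun x hx => h x (by simp [hx]))]
    simp

theorem pvAltGo_nil : pvAltGo [] = [] := by rw [pvAltGo.eq_def]

theorem pvAltGo_tag_nil (rest : List Char) (h : rest.dropWhile (fun d => d ≠ '>') = []) :
    pvAltGo ('<' :: rest) = '<' :: rest.takeWhile (fun d => d ≠ '>') := by
  rw [pvAltGo.eq_def]
  simp only [↓reduceIte]
  split
  · rfl
  · rename_i d r heq; rw [h] at heq; cases heq

theorem pvAltGo_tag_cons (rest : List Char) (d : Char) (r : List Char)
    (h : rest.dropWhile (fun x => x ≠ '>') = d :: r) :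
    pvAltGo ('<' :: rest) = ('<' :: (rest.takeWhile (fun x => x ≠ '>') ++ [d])) ++ pvAltGo r := by
  rw [pvAltGo.eq_def]
  simp only [↓reduceIte]
  split
  · rename_i heq; rw [h] at heq; cases heq
  · rename_i d' r' heq; rw [h] at heq; cases heq; rfl

theorem pvAltGo_text (c : Char) (rest : List Char) (hc : ¬ c = '<') :
    pvAltGo (c :: rest) = pvRevWords ((c :: rest).takeWhile (fun d => d ≠ '<'))
      ++ pvAltGo ((c :: rest).dropWhile (fun d => d ≠ '<')) := by
  rw [pvAltGo.eq_def]
  simp only [if_neg hc]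

theorem pv_main : ∀ (n : Nat) (s : List Char), s.length ≤ n →
    ∀ (a : List Char), pvFinal (s.foldl pvStepA (a, false, [])) = a ++ pvAltGo s := by
  intro n
  induction n with
  | zero =>
    intro s hs a
    have hnil : s = [] := by cases s <;> simp_all
    subst hnil
    simp [pvFinal, pvAltGo_nil, pv_flush_nil]
  | succ n ih =>
    intro s hs a
    cases s with
    | nil => simp [pvFinal, pvAltGo_nil, pv_flush_nil]
    | cons c rest =>
      by_cases hc : c = '<'
      · subst hc
        simp only [List.foldl_cons]
        rw [show pvStepA (a, false, []) '<' = (a ++ ['<'], true, []) from by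
          simp [pvStepA, pv_flush_nil]]
        have hbody : ∀ x ∈ rest.takeWhile (fun d => d ≠ '>'), x ≠ '>' := by
          intro x hx; simpa using List.mem_takeWhile_imp hx
        rcases h' : rest.dropWhile (fun d => d ≠ '>') with _ | ⟨d, r⟩
        · have hrest : rest = rest.takeWhile (fun d => d ≠ '>') := by
            conv_lhs => rw [← List.takeWhile_append_dropWhile (p := fun d => d ≠ '>') (l := rest)]
            rw [h']; simp
          conv_lhs => rw [hrest]
          rw [pv_tag_run _ hbody, pvAltGo_tag_nil rest h']
          simp [pvFinal, pv_flush_nil]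
        · have hd : d = '>' := by
            have := List.head?_dropWhile_not (fun d => decide (d ≠ '>')) rest
            rw [h'] at this; simpa using this
          subst hd
          have hrest : rest = rest.takeWhile (fun d => d ≠ '>') ++ '>' :: r := by
            conv_lhs => rw [← List.takeWhile_append_dropWhile (p := fun d => d ≠ '>') (l := rest)]
            rw [h']
          conv_lhs => rw [hrest]
          rw [List.foldl_append, pv_tag_run _ hbody, List.foldl_cons]
          rw [show pvStepA (a ++ ['<'] ++ rest.takeWhile (fun d => d ≠ '>'), true, []) '>'
              = (a ++ ['<'] ++ rest.takeWhile (fun d => d ≠ '>') ++ ['>'], false, []) from by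
            simp [pvStepA]]
          have hlen : r.length ≤ n := by
            have h1 : ('>' :: r).length ≤ rest.length := h' ▸ List.length_dropWhile_le _ rest
            simp at h1 hs; omega
          rw [ih r hlen, pvAltGo_tag_cons rest '>' r h']
          simp
      · have htext : ∀ x ∈ (c :: rest).takeWhile (fun d => d ≠ '<'), x ≠ '<' := by
          intro x hx; simpa using List.mem_takeWhile_imp hx
        have hsplit : c :: rest
            = (c :: rest).takeWhile (fun d => d ≠ '<') ++ (c :: rest).dropWhile (fun d => d ≠ '<') :=
          (List.takeWhile_append_dropWhile).symm
        have halen : ((c :: rest).dropWhile (fun d => d ≠ '<')).length ≤ rest.length := by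
          rw [List.dropWhile_cons_of_pos (by simpa using hc)]
          exact List.length_dropWhile_le _ rest
        rcases h' : (c :: rest).dropWhile (fun d => d ≠ '<') with _ | ⟨d, r⟩
        · conv_lhs => rw [hsplit, h']
          rw [List.foldl_append, pv_text_run _ htext]
          simp only [List.foldl_nil, List.nil_append, pvFinal]
          rw [pv_flush_eq, pvAltGo_text c rest hc, h', pvAltGo_nil]
          simp
        · have hd : d = '<' := by
            have := List.head?_dropWhile_not (fun d => decide (d ≠ '<')) (c :: rest)
            rw [h'] at this; simpa using this
          subst hd
          conv_lhs => rw [hsplit, h']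
          rw [List.foldl_append, pv_text_run _ htext, List.foldl_cons]
          simp only [List.nil_append]
          rw [show pvStepA (a, false, (c :: rest).takeWhile (fun d => d ≠ '<')) '<'
              = pvStepA (a ++ pvFlush ((c :: rest).takeWhile (fun d => d ≠ '<')), false, []) '<' from by
            simp [pvStepA, pv_flush_nil]]
          rw [← List.foldl_cons]
          have hlen : ('<' :: r).length ≤ n := by
            rw [h'] at halen
            simp only [List.length_cons] at halen hs ⊢
            omega
          rw [ih ('<' :: r) hlen]
          rw [pv_flush_eq, pvAltGo_text c rest hc, h']
          simp

-- ===== VERDICT (by name: the statement is the Claim_ definition above) =====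
theorem solution_spec : Claim_equal_solution := by
  intro sentence _
  unfold Spec_solution solution solution_alt
  have := pv_main sentence.toList.length sentence.toList le_rfl []
  simpa [pvFinal] using congrArg String.ofList this
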